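-- pv_equiv track=rewrite | github.com/uw-math-ai/PolyArithmeticCircuitsRL | net.py | polynomials_equal
-- ===== SOURCE A (Python) =====
-- def polynomials_equal(poly1, poly2):
--     """Check if two polynomials are equal"""
--     max_len = max(len(poly1), len(poly2))
--
--     for i in range(max_len):
--         val1 = poly1[i] if i < len(poly1) else 0
--         val2 = poly2[i] if i < len(poly2) else 0
--
--         if val1 != val2:
--             return False
--
--     return True
-- ===== SOURCE B (Python) =====
-- def _trim(p):
--     """Canonical form: coefficients with trailing zeros removed."""
--     p = list(p)
--     while p and p[-1] == 0:
--         p.pop()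
--     return p
--
--
-- def polynomials_equal(poly1, poly2):
--     """Check if two polynomials are equal"""
--     return _trim(poly1) == _trim(poly2)
-- ===== Notes on version B (the rewrite author's own statement) =====
-- stated objective: simpler
-- what changed: B normalizes each list by stripping trailing zero coefficients and compares the canonical lists with ==, instead of A's single index loop over range(max(len,len)) with zero-padding at each index.
import Mathlib
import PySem

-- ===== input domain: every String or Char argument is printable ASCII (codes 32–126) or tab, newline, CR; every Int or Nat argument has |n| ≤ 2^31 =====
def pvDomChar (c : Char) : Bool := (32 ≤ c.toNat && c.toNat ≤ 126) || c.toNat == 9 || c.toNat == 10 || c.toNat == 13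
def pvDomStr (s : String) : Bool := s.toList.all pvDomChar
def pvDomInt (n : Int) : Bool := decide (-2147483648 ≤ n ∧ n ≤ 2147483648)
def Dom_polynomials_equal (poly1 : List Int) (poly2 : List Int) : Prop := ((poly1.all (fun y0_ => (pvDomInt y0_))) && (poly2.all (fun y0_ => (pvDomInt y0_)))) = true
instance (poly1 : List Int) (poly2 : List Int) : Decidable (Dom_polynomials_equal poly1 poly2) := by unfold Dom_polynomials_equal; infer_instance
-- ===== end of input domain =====

-- B canonicalizes both coefficient lists by stripping trailing zeros and compares them with ==,
-- replacing A's zero-padded index loop (objective: simpler).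


-- ===== PORT A =====
-- the for-loop over range(max_len) with early return False
def pvLoopA (poly1 : List Int) (poly2 : List Int) : List Int → Bool
  | [] => true
  | i :: rest =>
    let val1 : Int := if i < (poly1.length : Int) then (PySem.List.pyGet? poly1 i).getD 0 else 0
    let val2 : Int := if i < (poly2.length : Int) then (PySem.List.pyGet? poly2 i).getD 0 else 0
    if val1 ≠ val2 then false else pvLoopA poly1 poly2 rest

def polynomials_equal (poly1 : List Int) (poly2 : List Int) : Bool :=
  let max_len : Int := max poly1.length poly2.length
  pvLoopA poly1 poly2 (PySem.List.pyRange 0 max_len 1)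

-- ===== PORT B =====
-- _trim: the while-pop from the right end is exactly dropping the leading zeros of the reverse
def pvTrim (p : List Int) : List Int := (p.reverse.dropWhile (fun x => x == 0)).reverse

def polynomials_equal_alt (poly1 : List Int) (poly2 : List Int) : Bool :=
  pvTrim poly1 == pvTrim poly2

-- ===== PRECONDITION & SPEC =====
def Spec_polynomials_equal (poly1 : List Int) (poly2 : List Int) (out : Bool) : Prop := out = polynomials_equal_alt poly1 poly2
instance (poly1 : List Int) (poly2 : List Int) (out : Bool) : Decidable (Spec_polynomials_equal poly1 poly2 out) := by unfold Spec_polynomials_equal; infer_instance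

-- ===== CLAIM (what is proved, stated in full; the proofs are below) =====
def Claim_equal_polynomials_equal : Prop := ∀ (poly1 : List Int) (poly2 : List Int), Dom_polynomials_equal poly1 poly2 → Spec_polynomials_equal poly1 poly2 (polynomials_equal poly1 poly2)

-- ===== LEMMAS AND PROOFS =====

-- coefficient of the polynomial at index i (0 beyond the list)
def pvCoeff (p : List Int) (i : Nat) : Int := p.getD i 0

lemma pvVal_eq (p : List Int) (i : Nat) :
    (if (i : Int) < (p.length : Int) then (PySem.List.pyGet? p (i : Int)).getD 0 else 0) = pvCoeff p i := by
  by_cases h : i < p.length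
  · simp [pvCoeff, h, List.getD_eq_getElem?_getD]
  · simp [pvCoeff, (by exact_mod_cast h : ¬ ((i : Int) < (p.length : Int))),
          List.getElem?_eq_none (by omega : p.length ≤ i)]

lemma pvLoopA_eq (p q : List Int) (idxs : List Nat) :
    pvLoopA p q (idxs.map (Nat.cast : Nat → Int)) = idxs.all (fun i => pvCoeff p i == pvCoeff q i) := by
  induction idxs with
  | nil => rfl
  | cons i rest ih =>
    have hstep : pvLoopA p q ((i : Int) :: rest.map (Nat.cast : Nat → Int))
        = if (if (i : Int) < (p.length : Int) then (PySem.List.pyGet? p (i : Int)).getD 0 else 0)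
            ≠ (if (i : Int) < (q.length : Int) then (PySem.List.pyGet? q (i : Int)).getD 0 else 0)
          then false else pvLoopA p q (rest.map (Nat.cast : Nat → Int)) := rfl
    rw [List.map_cons, hstep, pvVal_eq, pvVal_eq, List.all_cons, ih]
    by_cases h : pvCoeff p i = pvCoeff q i <;> simp [h]

lemma polyA_char (p q : List Int) :
    polynomials_equal p q = true ↔ ∀ i < max p.length q.length, pvCoeff p i = pvCoeff q i := by
  have hr : PySem.List.pyRange 0 (max p.length q.length : Int) 1
      = (List.range (max p.length q.length)).map (Nat.cast : Nat → Int) := by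
    rw [PySem.List.pyRange_one]
    have h1 : (((max p.length q.length : Int)) - 0).toNat = max p.length q.length := by omega
    rw [h1]
    exact List.map_congr_left (fun k _ => by simp)
  rw [polynomials_equal]
  simp only [hr, pvLoopA_eq, List.all_eq_true, List.mem_range]
  constructor
  · intro h i hi; exact beq_iff_eq.mp (h i hi)
  · intro h i hi; exact beq_iff_eq.mpr (h i hi)

lemma pvCoeff_all (p q : List Int) :
    (∀ i < max p.length q.length, pvCoeff p i = pvCoeff q i) ↔ ∀ i, pvCoeff p i = pvCoeff q i := by
  constructor
  · intro h i
    by_cases hi : i < max p.length q.length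
    · exact h i hi
    · simp [pvCoeff, List.getElem?_eq_none (by omega : p.length ≤ i),
            List.getElem?_eq_none (by omega : q.length ≤ i)]
  · intro h i _; exact h i

lemma pvCoeff_append_zeros (t zs : List Int) (hz : ∀ x ∈ zs, x = 0) (i : Nat) :
    pvCoeff (t ++ zs) i = pvCoeff t i := by
  by_cases h : i < t.length
  · simp [pvCoeff, List.getD_eq_getElem?_getD, List.getElem?_append_left h]
  · have h1 : pvCoeff t i = 0 := List.getD_eq_default _ _ (by omega)
    rw [h1]
    by_cases h2 : i < t.length + zs.length
    · have : (t ++ zs)[i]? = zs[i - t.length]? := by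
        rw [List.getElem?_append_right (by omega)]
      have hmem : zs[i - t.length] ∈ zs := List.getElem_mem (by omega)
      simp [pvCoeff, List.getD_eq_getElem?_getD, this,
            List.getElem?_eq_getElem (by omega : i - t.length < zs.length), hz _ hmem]
    · exact List.getD_eq_default _ _ (by simp; omega)

lemma pvCoeff_trim (p : List Int) (i : Nat) : pvCoeff (pvTrim p) i = pvCoeff p i := by
  have hsplit : p = pvTrim p ++ (p.reverse.takeWhile (fun x => x == 0)).reverse := by
    rw [pvTrim, ← List.reverse_append, List.takeWhile_append_dropWhile, List.reverse_reverse]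
  conv_rhs => rw [hsplit]
  rw [pvCoeff_append_zeros]
  intro x hx
  have := List.mem_takeWhile_imp (List.mem_reverse.mp hx)
  simpa using this

lemma pvHead_dropWhile (r : List Int) : (r.dropWhile (fun x => x == 0)).head? ≠ some 0 := by
  induction r with
  | nil => simp
  | cons x xs ih =>
    by_cases h : x = 0
    · simpa [List.dropWhile_cons, h] using ih
    · simp [h]

lemma pvTrim_last (p : List Int) : (pvTrim p).getLast? ≠ some 0 := by
  rw [pvTrim, List.getLast?_reverse]
  exact pvHead_dropWhile _

-- lists with no trailing zero are determined by their coefficient function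
lemma pvNZ_inj (a b : List Int) (ha : a.getLast? ≠ some 0) (hb : b.getLast? ≠ some 0)
    (h : ∀ i, pvCoeff a i = pvCoeff b i) : a = b := by
  have hlast : ∀ (l : List Int), l.getLast? ≠ some 0 → l ≠ [] → pvCoeff l (l.length - 1) ≠ 0 := by
    intro l hc hne h0
    apply hc
    have hlen : 0 < l.length := List.length_pos_iff.mpr hne
    have h1 : l[l.length - 1]? = some (pvCoeff l (l.length - 1)) := by
      simp [pvCoeff, List.getD_eq_getElem?_getD,
            List.getElem?_eq_getElem (by omega : l.length - 1 < l.length)]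
    rw [List.getLast?_eq_getElem?, h1, h0]
  have hlen : a.length = b.length := by
    by_contra hne
    rcases Nat.lt_or_ge a.length b.length with hlt | hge
    · have hb' : b ≠ [] := by intro h0; simp [h0] at hlt
      have := hlast b hb hb'
      have hz : pvCoeff a (b.length - 1) = 0 := List.getD_eq_default _ _ (by omega)
      rw [← h (b.length - 1)] at this; exact this hz
    · have hlt : b.length < a.length := by omega
      have ha' : a ≠ [] := by intro h0; simp [h0] at hlt
      have := hlast a ha ha'
      have hz : pvCoeff b (a.length - 1) = 0 := List.getD_eq_default _ _ (by omega)
      rw [h (a.length - 1)] at this; exact this hz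
  apply List.ext_getElem hlen
  intro i hi hbi
  have := h i
  simpa [pvCoeff, List.getD_eq_getElem?_getD, List.getElem?_eq_getElem hi,
         List.getElem?_eq_getElem hbi] using this

lemma polyB_char (p q : List Int) :
    polynomials_equal_alt p q = true ↔ ∀ i, pvCoeff p i = pvCoeff q i := by
  rw [polynomials_equal_alt, beq_iff_eq]
  constructor
  · intro h i
    rw [← pvCoeff_trim p, h, pvCoeff_trim]
  · intro h
    exact pvNZ_inj _ _ (pvTrim_last p) (pvTrim_last q)
      (fun i => by rw [pvCoeff_trim, pvCoeff_trim]; exact h i)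

-- ===== VERDICT (by name: the statement is the Claim_ definition above) =====
theorem polynomials_equal_spec : Claim_equal_polynomials_equal := by
  intro p q _
  unfold Spec_polynomials_equal
  have := (polyA_char p q).trans ((pvCoeff_all p q).trans (polyB_char p q).symm)
  cases hA : polynomials_equal p q
  · cases hB : polynomials_equal_alt p q
    · rfl
    · exact absurd (this.mpr hB) (by simp [hA])
  · exact (this.mp hA).symm
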